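-- pv_equiv track=rewrite | github.com/niekvleeuwen/advent-of-code | 2025/dag_5/dag_5.py | part_2
-- ===== SOURCE A (Python) =====
-- def part_2(id_ranges: list[tuple[int, int]]) -> int:
--     # Sort id ranges
--     id_ranges = sorted(id_ranges, key=lambda x: x[0])
--
--     # Merge overlapping ranges
--     merged = []
--     for start, end in id_ranges:
--         # directly append first result
--         if not merged:
--             merged.append([start, end])
--             continue
--
--         # Set end of last item
--         end_of_last_item = merged[-1][1]
--         if start <= end_of_last_item:
--             merged[-1][1] = max(end_of_last_item, end)
--         else:
--             merged.append([start, end])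
--
--     total_fresh = sum(end - start + 1 for start, end in merged)
--     return total_fresh
-- ===== SOURCE B (Python) =====
-- def part_2(id_ranges: list[tuple[int, int]]) -> int:
--     # Single pass over the sorted ranges keeping only a running maximum of the
--     # ends seen so far and the total; no merged-interval list is built.
--     total = 0
--     m = None  # max end seen so far
--     for s, e in sorted(id_ranges, key=lambda x: x[0]):
--         if m is None:
--             total += e - s + 1
--             m = e
--         elif s > m:
--             total += e - s + 1
--             if e > m:
--                 m = e
--         elif e > m:
--             total += e - m
--             m = e
--     return total
-- ===== Notes on version B (the rewrite author's own statement) =====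
-- stated objective: alternative
-- what changed: B replaces A's merge-into-a-list-of-intervals phase plus a final sum comprehension by a single fold over the sorted ranges that keeps only a running maximum end and an accumulating total, never materialising merged intervals.
import Mathlib
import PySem

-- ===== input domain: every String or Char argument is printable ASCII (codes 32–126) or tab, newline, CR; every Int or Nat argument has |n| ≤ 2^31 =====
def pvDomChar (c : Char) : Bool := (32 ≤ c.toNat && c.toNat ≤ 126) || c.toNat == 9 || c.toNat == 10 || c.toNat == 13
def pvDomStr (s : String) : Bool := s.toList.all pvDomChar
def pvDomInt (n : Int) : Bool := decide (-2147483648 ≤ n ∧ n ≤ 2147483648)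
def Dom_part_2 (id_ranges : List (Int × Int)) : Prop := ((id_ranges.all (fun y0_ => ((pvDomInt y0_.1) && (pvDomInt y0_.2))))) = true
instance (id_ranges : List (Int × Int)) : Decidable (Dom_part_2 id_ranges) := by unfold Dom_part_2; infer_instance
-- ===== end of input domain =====

-- B folds the sorted ranges with a running maximum end and a total, instead of
-- A's building of a merged-interval list followed by a sum; return values are equal.

-- ===== PORT A =====
-- one loop iteration: append, or update the end of the last merged interval
def part2Step (merged : List (Int × Int)) (p : Int × Int) : List (Int × Int) :=
  match merged.getLast? with
  | none => merged ++ [p]                      -- if not merged: merged.append([start, end])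
  | some lastp =>                              -- end_of_last_item = merged[-1][1]
    if p.1 ≤ lastp.2 then
      merged.dropLast ++ [(lastp.1, max lastp.2 p.2)]   -- merged[-1][1] = max(...)
    else
      merged ++ [p]

def part_2 (id_ranges : List (Int × Int)) : Int :=
  (((PySem.List.sorted id_ranges (fun x => x.1)).foldl part2Step []).map
    (fun p => p.2 - p.1 + 1)).sum

-- ===== PORT B =====
-- state: (running max end m — none before the first element, running total)
def part2AltStep (st : Option Int × Int) (p : Int × Int) : Option Int × Int :=
  match st with
  | (none, total) => (some p.2, total + (p.2 - p.1 + 1))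
  | (some m, total) =>
    if m < p.1 then
      (some (if m < p.2 then p.2 else m), total + (p.2 - p.1 + 1))
    else if m < p.2 then
      (some p.2, total + (p.2 - m))
    else (some m, total)

def part_2_alt (id_ranges : List (Int × Int)) : Int :=
  ((PySem.List.sorted id_ranges (fun x => x.1)).foldl part2AltStep (none, 0)).2

-- ===== PRECONDITION & SPEC =====
def Spec_part_2 (id_ranges : List (Int × Int)) (out : Int) : Prop := out = part_2_alt id_ranges
instance (id_ranges : List (Int × Int)) (out : Int) : Decidable (Spec_part_2 id_ranges out) := by unfold Spec_part_2; infer_instance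

-- ===== CLAIM (what is proved, stated in full; the proofs are below) =====
def Claim_equal_part_2 : Prop := ∀ (id_ranges : List (Int × Int)), Dom_part_2 id_ranges → Spec_part_2 id_ranges (part_2 id_ranges)

-- ===== LEMMAS AND PROOFS =====

-- A's final total over a merged list
def sumA (ms : List (Int × Int)) : Int := (ms.map (fun p => p.2 - p.1 + 1)).sum

theorem sumA_append (l : List (Int × Int)) (x : Int × Int) :
    sumA (l ++ [x]) = sumA l + (x.2 - x.1 + 1) := by
  simp [sumA]

theorem dropLast_append_of_getLast? (ms : List (Int × Int)) (p : Int × Int)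
    (h : ms.getLast? = some p) : ms.dropLast ++ [p] = ms := by
  have hne : ms ≠ [] := by intro h0; subst h0; simp at h
  have := List.dropLast_concat_getLast hne
  rwa [List.getLast_eq_iff_getLast?_eq_some hne |>.mpr h] at this

theorem sumA_update (ms : List (Int × Int)) (bs be z : Int)
    (h : ms.getLast? = some (bs, be)) :
    sumA (ms.dropLast ++ [(bs, z)]) = sumA ms + (z - be) := by
  conv_rhs => rw [← dropLast_append_of_getLast? ms (bs, be) h]
  rw [sumA_append, sumA_append]; ring

-- the loop invariant: A's state ms (last interval (bs, be)) and B's state (m, tot)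
theorem main_inv (ys : List (Int × Int)) :
    ∀ (ms : List (Int × Int)) (bs be m tot : Int),
    ms.getLast? = some (bs, be) →
    tot = sumA ms →
    be ≤ m →
    (m = be ∨ m < bs) →
    (∀ x ∈ ys, bs ≤ x.1) →
    ys.Pairwise (fun a b => a.1 ≤ b.1) →
    sumA (ys.foldl part2Step ms) = (ys.foldl part2AltStep (some m, tot)).2 := by
  induction ys with
  | nil => intro ms bs be m tot h ht _ _ _ _; simp [List.foldl, ht]
  | cons hd rest ih =>
    rintro ms bs be m tot hlast ht hbm hor hge hpw
    obtain ⟨s, e⟩ := hd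
    have hbs : bs ≤ s := hge (s, e) (by simp)
    have hge' : ∀ x ∈ rest, bs ≤ x.1 := fun x hx => hge x (by simp [hx])
    have hpw' : rest.Pairwise (fun a b => a.1 ≤ b.1) := hpw.tail
    have hhead : ∀ x ∈ rest, s ≤ x.1 := by
      intro x hx; exact (List.pairwise_cons.mp hpw).1 x hx
    by_cases h1 : s ≤ be
    · -- merge: here m = be (m < bs would give be < s)
      have hm : m = be := by
        rcases hor with h | h
        · exact h
        · exact absurd (lt_of_le_of_lt (h1.trans hbm) (lt_of_lt_of_le h hbs)) (lt_irrefl s)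
      subst hm
      have hA : part2Step ms (s, e) = ms.dropLast ++ [(bs, max m e)] := by
        simp [part2Step, hlast, h1]
      have hlast' : (ms.dropLast ++ [(bs, max m e)]).getLast? = some (bs, max m e) := by
        simp
      by_cases h2 : m < e
      · have hB : part2AltStep (some m, tot) (s, e) = (some e, tot + (e - m)) := by
          simp [part2AltStep, not_lt.mpr h1, h2]
        rw [List.foldl_cons, List.foldl_cons, hA, hB]
        have hmax : max m e = e := max_eq_right (le_of_lt h2)
        rw [hmax] at hlast' ⊢
        exact ih _ bs e e _ hlast' (by rw [sumA_update ms bs m e hlast, ht]) le_rfl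
          (Or.inl rfl) hge' hpw'
      · have hB : part2AltStep (some m, tot) (s, e) = (some m, tot) := by
          simp [part2AltStep, not_lt.mpr h1, h2]
        rw [List.foldl_cons, List.foldl_cons, hA, hB]
        have hmax : max m e = m := max_eq_left (not_lt.mp h2)
        rw [hmax] at hlast' ⊢
        exact ih _ bs m m _ hlast'
          (by rw [sumA_update ms bs m m hlast, ht]; ring) le_rfl (Or.inl rfl) hge' hpw'
    · -- new block: s > be, and in fact s > m
      have hsm : m < s := by
        rcases hor with h | h
        · rw [h]; exact not_le.mp h1
        · exact lt_of_lt_of_le h hbs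
      have hA : part2Step ms (s, e) = ms ++ [(s, e)] := by
        simp [part2Step, hlast, h1]
      have hB : part2AltStep (some m, tot) (s, e) =
          (some (if m < e then e else m), tot + (e - s + 1)) := by
        simp [part2AltStep, hsm]
      rw [List.foldl_cons, List.foldl_cons, hA, hB]
      have hlast' : (ms ++ [(s, e)]).getLast? = some (s, e) := by simp
      by_cases h3 : m < e
      · rw [if_pos h3]
        exact ih _ s e e _ hlast' (by rw [sumA_append, ht]) le_rfl (Or.inl rfl) hhead hpw'
      · rw [if_neg h3]
        exact ih _ s e m _ hlast' (by rw [sumA_append, ht]) (not_lt.mp h3)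
          (Or.inr hsm) hhead hpw'

theorem part_2_eq_alt (id_ranges : List (Int × Int)) :
    part_2 id_ranges = part_2_alt id_ranges := by
  unfold part_2 part_2_alt
  have hpw := PySem.List.sorted_pairwise (xs := id_ranges) (key := fun x => x.1)
  cases hys : PySem.List.sorted id_ranges (fun x => x.1) with
  | nil => simp
  | cons hd rest =>
    obtain ⟨s, e⟩ := hd
    rw [hys] at hpw
    have hA1 : part2Step [] (s, e) = [(s, e)] := by simp [part2Step]
    have hB1 : part2AltStep (none, 0) (s, e) = (some e, 0 + (e - s + 1)) := rfl
    rw [List.foldl_cons, List.foldl_cons, hA1, hB1]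
    have := main_inv rest [(s, e)] s e e (0 + (e - s + 1))
      (by simp) (by simp [sumA]) le_rfl (Or.inl rfl)
      (fun x hx => (List.pairwise_cons.mp hpw).1 x hx) hpw.tail
    simpa [sumA] using this

-- ===== VERDICT (by name: the statement is the Claim_ definition above) =====
theorem part_2_spec : Claim_equal_part_2 := by
  intro id_ranges _
  unfold Spec_part_2
  exact part_2_eq_alt id_ranges
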